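-- pv_equiv track=rewrite | github.com/truehang/wuzifenpei | xunzhaoluxian.py | minroutenumber
-- ===== SOURCE A (Python) =====
-- def minroutenumber(minRouteJH):
--     ####返回到每个点的路线序号
--     routenumber=[]
--     ###https://blog.csdn.net/xijuezhu8128/article/details/88555161
--     routekeys = list(minRouteJH.keys())
--     routevalues = list(minRouteJH.values())
--     idx=0
--     lenr=8
--     while idx < lenr:
--         zhedian=idx+1
--         for i in routevalues:
--             if zhedian in i:
--                 routenumber.append(routekeys[routevalues.index(i)])
--         idx+=1
--     return routenumber
-- ===== SOURCE B (Python) =====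
-- def minroutenumber(minRouteJH):
--     ####返回到每个点的路线序号
--     # one pass over the routes, dropping each route's key into per-point buckets
--     buckets = {p: [] for p in range(1, 9)}
--     for k, v in minRouteJH.items():
--         for p in range(1, 9):
--             if p in v:
--                 buckets[p].append(k)
--     routenumber = []
--     for p in range(1, 9):
--         routenumber += buckets[p]
--     return routenumber
-- ===== Notes on version B (the rewrite author's own statement) =====
-- stated objective: faster
-- what changed: A rescans all route values for each of the 8 points and recomputes routevalues.index(i) (a linear scan) on every hit; B makes one pass over the routes, dropping each route's own key into per-point buckets which are then concatenated in point order. Pre_ excludes dicts where two routes have equal value lists containing a point 1..8, on which A's routevalues.index aliases the duplicate to the first key with an equal value -- a first-vs-last corner neither behaviour is specified.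
-- outside the precondition, e.g. on minroutenumber({1: [1], 2: [1]}): A returns [1, 1], B returns [1, 2]
import Mathlib
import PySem

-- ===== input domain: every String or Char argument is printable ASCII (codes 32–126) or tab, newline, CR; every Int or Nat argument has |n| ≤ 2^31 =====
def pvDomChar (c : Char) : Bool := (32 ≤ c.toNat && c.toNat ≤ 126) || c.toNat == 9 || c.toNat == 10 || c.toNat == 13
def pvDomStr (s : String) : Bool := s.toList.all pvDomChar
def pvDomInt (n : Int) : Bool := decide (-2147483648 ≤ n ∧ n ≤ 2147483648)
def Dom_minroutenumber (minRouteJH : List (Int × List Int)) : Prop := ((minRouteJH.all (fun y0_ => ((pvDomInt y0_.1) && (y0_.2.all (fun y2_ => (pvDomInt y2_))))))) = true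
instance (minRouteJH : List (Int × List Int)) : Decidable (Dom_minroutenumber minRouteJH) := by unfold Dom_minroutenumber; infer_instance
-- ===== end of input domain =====

-- B replaces A's point-by-point rescans (with a repeated routevalues.index inner scan) by one
-- bucket-filling pass over the routes (objective: faster); Pre_ restricts to distinct route values.


-- ===== PORT A =====
-- routekeys[routevalues.index(i)]: the index lookup always succeeds (i comes from routevalues,
-- and routekeys has the same length), so the Option is collapsed with .getD 0 (never taken).
def minroutenumber (minRouteJH : List (Int × List Int)) : List Int :=
  let routekeys := minRouteJH.map Prod.fst
  let routevalues := minRouteJH.map Prod.snd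
  -- while idx < 8, zhedian = idx + 1
  (PySem.List.pyRange 0 8 1).foldl (fun routenumber idx =>
    let zhedian := idx + 1
    routevalues.foldl (fun acc i =>
      if zhedian ∈ i then
        acc ++ [((PySem.List.index? routevalues i).bind
          (fun j => PySem.List.pyGet? routekeys (j : Int))).getD 0]
      else acc) routenumber) []

-- ===== PORT B =====
-- buckets[p] lookups always succeed (keys 1..8 inserted beforehand); collapsed with getD
-- (the default is never taken). buckets[p].append is Dict.modify at an existing key.
def minroutenumber_alt (minRouteJH : List (Int × List Int)) : List Int :=
  let buckets0 : PySem.Dict Int (List Int) :=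
    (PySem.List.pyRange 1 9 1).foldl (fun d p => d.insert p []) PySem.Dict.empty
  let buckets :=
    minRouteJH.foldl (fun b kv =>
      (PySem.List.pyRange 1 9 1).foldl (fun b2 p =>
        if p ∈ kv.2 then b2.modify p [] (fun l => l ++ [kv.1]) else b2) b) buckets0
  (PySem.List.pyRange 1 9 1).foldl (fun routenumber p => routenumber ++ buckets.getD p []) []

-- ===== PRECONDITION & SPEC =====
-- Pre_ excludes dicts in which two routes have equal value lists containing a point 1..8:
-- there A's routevalues.index aliases every duplicate to the first key with an equal value —
-- a first-vs-last corner neither behaviour is specified; B uses each route's own key.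
def Pre_minroutenumber (minRouteJH : List (Int × List Int)) : Prop :=
  minRouteJH.Pairwise (fun a b => a.2 = b.2 → ∀ p ∈ a.2, ¬(1 ≤ p ∧ p ≤ 8))
instance (minRouteJH : List (Int × List Int)) : Decidable (Pre_minroutenumber minRouteJH) := by unfold Pre_minroutenumber; infer_instance
def pvWitness_minroutenumber : (List (Int × List Int)) := [(1, [1, 2]), (2, [3])]
def Spec_minroutenumber (minRouteJH : List (Int × List Int)) (out : List Int) : Prop := out = minroutenumber_alt minRouteJH
instance (minRouteJH : List (Int × List Int)) (out : List Int) : Decidable (Spec_minroutenumber minRouteJH out) := by unfold Spec_minroutenumber; infer_instance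

-- ===== CLAIM (what is proved, stated in full; the proofs are below) =====
def Claim_equal_minroutenumber : Prop := ∀ (minRouteJH : List (Int × List Int)), Dom_minroutenumber minRouteJH → Pre_minroutenumber minRouteJH → Spec_minroutenumber minRouteJH (minroutenumber minRouteJH)

-- ===== LEMMAS AND PROOFS =====

-- first key of m whose value equals v (A's routekeys[routevalues.index(v)])
def pvCanon (m : List (Int × List Int)) (v : List Int) : Int :=
  ((m.find? (fun kv => kv.2 == v)).map Prod.fst).getD 0

-- A's routekeys[routevalues.index(i)] is the first key with an equal value
theorem pvA_key_idx (m : List (Int × List Int)) (v : List Int) :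
    (PySem.List.index? (m.map Prod.snd) v).bind (fun j => (m.map Prod.fst)[j]?)
      = (m.find? (fun kv => kv.2 == v)).map Prod.fst := by
  induction m with
  | nil => simp
  | cons kv m ih =>
    by_cases h : kv.2 = v
    · subst h
      rw [List.map_cons, PySem.List.index?_cons_self]
      simp [List.find?_cons_of_pos]
    · rw [List.map_cons, PySem.List.index?_cons_of_ne _ h,
        List.find?_cons_of_neg (by simp [h]), ← ih]
      cases PySem.List.index? (m.map Prod.snd) v <;> simp

theorem pvA_key_eq (m : List (Int × List Int)) (v : List Int) :
    ((PySem.List.index? (m.map Prod.snd) v).bind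
        (fun j => PySem.List.pyGet? (m.map Prod.fst) (j : Int))).getD 0
      = pvCanon m v := by
  simp only [PySem.List.pyGet?_natCast, pvA_key_idx, pvCanon]

-- for a route containing a point 1..8, the first key with its value is its own key
theorem pvCanon_self (m : List (Int × List Int))
    (h : m.Pairwise (fun a b => a.2 = b.2 → ∀ p ∈ a.2, ¬(1 ≤ p ∧ p ≤ 8)))
    (kv : Int × List Int) (hkv : kv ∈ m)
    (p : Int) (hpv : p ∈ kv.2) (hp1 : 1 ≤ p) (hp8 : p ≤ 8) : pvCanon m kv.2 = kv.1 := by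
  induction m with
  | nil => cases hkv
  | cons kv' m ih =>
    rw [List.pairwise_cons] at h
    rcases List.mem_cons.mp hkv with rfl | hmem
    · simp [pvCanon, List.find?_cons_of_pos]
    · have hne : kv'.2 ≠ kv.2 := by
        intro he
        exact h.1 kv hmem he p (he ▸ hpv) ⟨hp1, hp8⟩
      simpa [pvCanon, List.find?_cons_of_neg, hne] using ih h.2 hmem

-- one route's inner loop touches exactly the buckets of the points the route contains
theorem pvInner (v : List Int) (c : Int) (q : Int) :
    ∀ (L : List Int), L.Nodup → ∀ (b : PySem.Dict Int (List Int)),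
      (L.foldl (fun b2 p => if p ∈ v then b2.modify p [] (fun l => l ++ [c]) else b2) b).getD q []
        = if q ∈ L ∧ q ∈ v then b.getD q [] ++ [c] else b.getD q [] := by
  intro L
  induction L with
  | nil => intro _ b; simp
  | cons p L ih =>
    intro hL b
    have hp : p ∉ L := (List.nodup_cons.mp hL).1
    rw [List.foldl_cons, ih (List.nodup_cons.mp hL).2]
    by_cases hq : q = p
    · subst hq
      simp only [hp, false_and, if_false, List.mem_cons, true_or, true_and]
      by_cases hv : q ∈ v
      · simp [hv, PySem.Dict.getD_modify_self]
      · simp [hv]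
    · by_cases hv : p ∈ v
      · simp [hv, PySem.Dict.getD_modify, hq, List.mem_cons]
      · simp [hv, List.mem_cons, hq]

-- the bucket of point q after B's filling pass
theorem pvBuckets_getD (q : Int) (hq : q ∈ PySem.List.pyRange 1 9 1) :
    ∀ (m : List (Int × List Int)) (b : PySem.Dict Int (List Int)),
    (m.foldl (fun b kv =>
        (PySem.List.pyRange 1 9 1).foldl (fun b2 p =>
          if p ∈ kv.2 then b2.modify p [] (fun l => l ++ [kv.1]) else b2) b) b).getD q []
      = b.getD q [] ++ (m.filter (fun kv => decide (q ∈ kv.2))).map Prod.fst := by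
  intro m
  induction m with
  | nil => intro b; simp
  | cons kv m ih =>
    intro b
    rw [List.foldl_cons, ih,
      pvInner kv.2 kv.1 q _ (PySem.List.nodup_pyRange_one 1 9) b]
    by_cases hv : q ∈ kv.2
    · simp [hq, hv]
    · simp [hq, hv]

-- the initial buckets are empty at every point of 1..8
theorem pvBuckets0_gen (q : Int) :
    ∀ (L : List Int) (d : PySem.Dict Int (List Int)),
      ((L.foldl (fun d p => d.insert p []) d).getD q ([] : List Int))
        = if q ∈ L then [] else d.getD q [] := by
  intro L
  induction L with
  | nil => intro d; simp
  | cons p L ih =>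
    intro d
    rw [List.foldl_cons, ih]
    by_cases hq : q ∈ L
    · simp [hq]
    · simp [hq, List.mem_cons, PySem.Dict.getD_insert]

-- 'if P i: out.append(g(i))' over a list is append of filter-map
theorem pvSeg {a b : Type} (P : a → Prop) [DecidablePred P] (g : a → b) :
    ∀ (l : List a) (X : List b),
      l.foldl (fun acc i => if P i then acc ++ [g i] else acc) X
        = X ++ (l.filter (fun i => decide (P i))).map g := by
  intro l
  induction l with
  | nil => intro X; simp
  | cons x l ih =>
    intro X
    rw [List.foldl_cons, ih]
    by_cases h : P x
    · simp [h]
    · simp [h]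

-- ===== VERDICT (by name: the statement is the Claim_ definition above) =====
theorem minroutenumber_spec : Claim_equal_minroutenumber := by
  intro m _ hpre
  simp only [Spec_minroutenumber, minroutenumber, minroutenumber_alt]
  have hB : ∀ p : Int, p ∈ PySem.List.pyRange 1 9 1 →
      ((m.foldl
          (fun b kv => (PySem.List.pyRange 1 9 1).foldl
              (fun b2 p => if p ∈ kv.2 then b2.modify p [] (fun l => l ++ [kv.1]) else b2) b)
          ((PySem.List.pyRange 1 9 1).foldl (fun d p => d.insert p [])
            PySem.Dict.empty)).getD p [])
        = (m.filter (fun kv => decide (p ∈ kv.2))).map Prod.fst := by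
    intro p hp
    have h1 := pvBuckets_getD p hp m
        ((PySem.List.pyRange 1 9 1).foldl (fun d p => d.insert p []) PySem.Dict.empty)
    have h2 := pvBuckets0_gen p (PySem.List.pyRange 1 9 1) PySem.Dict.empty
    simp only [hp, if_pos] at h2
    rw [h1, h2]
    simp
  have hBside := PySem.List.foldl_congr_mem
    (l := PySem.List.pyRange 1 9 1) (init := ([] : List Int))
    (f := fun out p => out ++
      ((m.foldl
          (fun b kv => (PySem.List.pyRange 1 9 1).foldl
              (fun b2 p => if p ∈ kv.2 then b2.modify p [] (fun l => l ++ [kv.1]) else b2) b)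
          ((PySem.List.pyRange 1 9 1).foldl (fun d p => d.insert p [])
            PySem.Dict.empty)).getD p []))
    (g := fun out p => out ++
      (m.filter (fun kv => decide (p ∈ kv.2))).map Prod.fst)
    (fun acc p hp => by beta_reduce; rw [hB p hp])
  rw [hBside]
  have hfix : ∀ p : Int, 1 ≤ p → p ≤ 8 →
      (m.filter (fun kv => decide (p ∈ kv.2))).map (fun kv => pvCanon m kv.2)
        = (m.filter (fun kv => decide (p ∈ kv.2))).map Prod.fst := by
    intro p hp1 hp8
    refine List.map_congr_left (fun kv hkv => ?_)
    exact pvCanon_self m hpre kv (List.mem_of_mem_filter hkv) p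
      (of_decide_eq_true ((List.mem_filter.mp hkv).2)) hp1 hp8
  simp only [pvSeg, pvA_key_eq, List.filter_map, List.map_map]
  have h08 : PySem.List.pyRange 0 8 1 = [0, 1, 2, 3, 4, 5, 6, 7] := by decide
  have h19 : PySem.List.pyRange 1 9 1 = [1, 2, 3, 4, 5, 6, 7, 8] := by decide
  rw [h08, h19]
  simp only [List.foldl_cons, List.foldl_nil, List.nil_append, Function.comp_def]
  norm_num [← hfix 1 (by norm_num) (by norm_num), ← hfix 2 (by norm_num) (by norm_num),
    ← hfix 3 (by norm_num) (by norm_num), ← hfix 4 (by norm_num) (by norm_num),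
    ← hfix 5 (by norm_num) (by norm_num), ← hfix 6 (by norm_num) (by norm_num),
    ← hfix 7 (by norm_num) (by norm_num), ← hfix 8 (by norm_num) (by norm_num),
    List.filter_map, List.map_map, Function.comp_def]
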